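-- pv_equiv track=rewrite | github.com/2hyungjin/cote-python | cote/programmers/search/test.py | solution
-- ===== SOURCE A (Python) =====
-- def solution(answers):
--     a = [1, 2, 3, 4, 5]
--     b = [2, 1, 2, 3, 2, 4, 2, 5]
--     c = [3, 3, 1, 1, 2, 2, 4, 4, 5, 5]
--
--     scores = [0] * 3
--
--     for num in range(len(answers)):
--         if answers[num] == a[num % len(a)]: scores[0] += 1
--         if answers[num] == b[num % len(b)]: scores[1] += 1
--         if answers[num] == c[num % len(c)]: scores[2] += 1
--
--     score = max(scores)
--
--     return [i + 1 for i in range(len(scores)) if scores[i] == score]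
-- ===== SOURCE B (Python) =====
-- def _count_matches(answers, pat):
--     total = 0
--     rest = pat
--     for ans in answers:
--         if not rest:
--             rest = pat
--         total += (ans == rest[0])
--         rest = rest[1:]
--     return total
--
--
-- def solution(answers):
--     patterns = [[1, 2, 3, 4, 5],
--                 [2, 1, 2, 3, 2, 4, 2, 5],
--                 [3, 3, 1, 1, 2, 2, 4, 4, 5, 5]]
--     scores = [_count_matches(answers, pat) for pat in patterns]
--     best = max(scores)
--     return [i + 1 for i, s in enumerate(scores) if s == best]
-- ===== Notes on version B (the rewrite author's own statement) =====
-- stated objective: alternative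
-- what changed: B scores each of the three answer patterns in its own sequential pass that cycles the pattern by rotating a suffix (no modulo indexing), instead of A's single loop over positions doing three modulo-indexed comparisons per step.
import Mathlib
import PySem

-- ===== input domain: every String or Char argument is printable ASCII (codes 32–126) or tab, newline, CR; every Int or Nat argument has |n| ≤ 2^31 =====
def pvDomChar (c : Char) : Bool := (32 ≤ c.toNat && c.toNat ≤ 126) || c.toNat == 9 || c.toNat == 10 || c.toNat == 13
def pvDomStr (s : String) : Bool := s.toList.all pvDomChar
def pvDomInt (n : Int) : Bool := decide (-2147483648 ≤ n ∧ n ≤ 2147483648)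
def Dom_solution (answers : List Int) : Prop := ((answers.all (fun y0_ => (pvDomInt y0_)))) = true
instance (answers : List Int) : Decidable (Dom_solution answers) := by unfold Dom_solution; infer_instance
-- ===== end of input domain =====

-- B re-implements the quiz-score count pattern-major: one independent cyclic-rotation pass
-- per answer pattern, instead of A's single index loop with three modulo lookups ('alternative').

-- ===== PORT A =====
def solution (answers : List Int) : List Int :=
  let a : List Int := [1, 2, 3, 4, 5]
  let b : List Int := [2, 1, 2, 3, 2, 4, 2, 5]
  let c : List Int := [3, 3, 1, 1, 2, 2, 4, 4, 5, 5]
  -- scores = [0]*3, mutated in the loop: modelled as a triple accumulator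
  let scores := (PySem.List.pyRange 0 answers.length 1).foldl
    (fun (s : Int × Int × Int) num =>
      let s0 := if PySem.List.pyGetD answers num 0 = PySem.List.pyGetD a (PySem.Int.mod num (a.length : Int)) 0 then s.1 + 1 else s.1
      let s1 := if PySem.List.pyGetD answers num 0 = PySem.List.pyGetD b (PySem.Int.mod num (b.length : Int)) 0 then s.2.1 + 1 else s.2.1
      let s2 := if PySem.List.pyGetD answers num 0 = PySem.List.pyGetD c (PySem.Int.mod num (c.length : Int)) 0 then s.2.2 + 1 else s.2.2
      (s0, s1, s2)) (0, 0, 0)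
  let score := (PySem.List.max? [scores.1, scores.2.1, scores.2.2] (fun y => y)).getD 0
  ((PySem.List.pyRange 0 3 1).filter
      (fun i => PySem.List.pyGetD [scores.1, scores.2.1, scores.2.2] i 0 == score)).map (fun i => i + 1)

-- ===== PORT B =====
-- the loop of _count_matches: state (total, rest); rest[0] read as headD (rest' is
-- never empty here since every pattern passed is nonempty, so this is exact)
def cmGo (pat : List Int) : List Int → Int → List Int → Int
  | [], total, _ => total
  | ans :: more, total, rest =>
    let rest' := if rest = [] then pat else rest
    cmGo pat more (total + if ans = rest'.headD 0 then 1 else 0) rest'.tail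

def countMatches (answers pat : List Int) : Int := cmGo pat answers 0 pat

def solution_alt (answers : List Int) : List Int :=
  let patterns : List (List Int) :=
    [[1, 2, 3, 4, 5], [2, 1, 2, 3, 2, 4, 2, 5], [3, 3, 1, 1, 2, 2, 4, 4, 5, 5]]
  let scores := patterns.map (fun pat => countMatches answers pat)
  let best := (PySem.List.max? scores (fun y => y)).getD 0
  ((PySem.List.enumerate scores 0).filter (fun q => q.2 == best)).map (fun q => q.1 + 1)

-- ===== PRECONDITION & SPEC =====
def Spec_solution (answers : List Int) (out : List Int) : Prop := out = solution_alt answers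
instance (answers : List Int) (out : List Int) : Decidable (Spec_solution answers out) := by unfold Spec_solution; infer_instance

-- ===== CLAIM (what is proved, stated in full; the proofs are below) =====
def Claim_equal_solution : Prop := ∀ (answers : List Int), Dom_solution answers → Spec_solution answers (solution answers)

-- ===== LEMMAS AND PROOFS =====

-- reference count: matches of xs against pattern p cycled, starting at offset m
def specCnt (p : List Int) : List Int → Nat → Int
  | [], _ => 0
  | x :: xs, m => (if x = p.getD (m % p.length) 0 then 1 else 0) + specCnt p xs (m + 1)

theorem specCnt_add_length (p : List Int) (xs : List Int) :
    ∀ m : Nat, specCnt p xs (m + p.length) = specCnt p xs m := by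
  induction xs with
  | nil => intro m; rfl
  | cons x xs ih =>
      intro m
      simp only [specCnt, Nat.add_mod_right]
      rw [show m + p.length + 1 = (m + 1) + p.length by omega, ih]

theorem getD_append_length (pre : List Int) (x : Int) (xs : List Int) :
    (pre ++ x :: xs).getD pre.length 0 = x := by
  induction pre with
  | nil => rfl
  | cons h t ih => simpa using ih

theorem cmGo_spec (p : List Int) (hp : p ≠ []) :
    ∀ (xs : List Int) (t : Int) (m : Nat), m ≤ p.length →
      cmGo p xs t (p.drop m) = t + specCnt p xs m := by
  intro xs
  induction xs with
  | nil => intro t m _; simp [cmGo, specCnt]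
  | cons x xs ih =>
      intro t m hm
      by_cases hme : m = p.length
      · subst hme
        obtain ⟨ph, pt, rfl⟩ : ∃ h t', p = h :: t' := by
          cases p with | nil => exact absurd rfl hp | cons h t' => exact ⟨h, t', rfl⟩
        rw [List.drop_length]
        show cmGo (ph :: pt) xs (t + if x = ph then 1 else 0) pt = _
        have h2 := ih (t + if x = ph then 1 else 0) 1 (by simp)
        simp only [List.drop_succ_cons, List.drop_zero] at h2
        rw [h2]
        simp only [specCnt, Nat.mod_self, List.getD_cons_zero]
        rw [show (ph :: pt).length + 1 = 1 + (ph :: pt).length by omega,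
          specCnt_add_length]
        omega
      · have hmlt : m < p.length := lt_of_le_of_ne hm hme
        have hne : p.drop m ≠ [] := by
          simp [List.drop_eq_nil_iff]; omega
        show cmGo p xs
            (t + if x = (if p.drop m = [] then p else p.drop m).headD 0 then 1 else 0)
            (if p.drop m = [] then p else p.drop m).tail = _
        rw [if_neg hne]
        have hhead : (p.drop m).headD 0 = p.getD m 0 := by
          rw [List.headD_eq_head?_getD, List.head?_drop, List.getD_eq_getElem?_getD]
        have htail : (p.drop m).tail = p.drop (m + 1) := by
          rw [List.tail_drop]
        rw [hhead, htail, ih _ (m + 1) (by omega)]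
        simp only [specCnt, Nat.mod_eq_of_lt hmlt]
        omega

theorem cm_eq_spec (p : List Int) (hp : p ≠ []) (xs : List Int) :
    countMatches xs p = specCnt p xs 0 := by
  show cmGo p xs 0 p = specCnt p xs 0
  have h := cmGo_spec p hp xs 0 0 (Nat.zero_le _)
  rw [List.drop_zero] at h
  rw [h, zero_add]

-- A's interleaved fold computes the three specCnt counts
theorem foldA_spec (a b c : List Int) :
    ∀ (xs pre : List Int) (t0 t1 t2 : Int),
      (PySem.List.pyRange (pre.length : Int) ((pre ++ xs).length : Int) 1).foldl
        (fun (s : Int × Int × Int) num =>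
          let s0 := if PySem.List.pyGetD (pre ++ xs) num 0 = PySem.List.pyGetD a (PySem.Int.mod num (a.length : Int)) 0 then s.1 + 1 else s.1
          let s1 := if PySem.List.pyGetD (pre ++ xs) num 0 = PySem.List.pyGetD b (PySem.Int.mod num (b.length : Int)) 0 then s.2.1 + 1 else s.2.1
          let s2 := if PySem.List.pyGetD (pre ++ xs) num 0 = PySem.List.pyGetD c (PySem.Int.mod num (c.length : Int)) 0 then s.2.2 + 1 else s.2.2
          (s0, s1, s2)) (t0, t1, t2)
      = (t0 + specCnt a xs pre.length, t1 + specCnt b xs pre.length,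
         t2 + specCnt c xs pre.length) := by
  intro xs
  induction xs with
  | nil =>
      intro pre t0 t1 t2
      simp only [List.append_nil]
      rw [PySem.List.pyRange_one_eq_nil (le_refl _)]
      simp [specCnt]
  | cons x xs ih =>
      intro pre t0 t1 t2
      rw [PySem.List.pyRange_one_cons (by simp)]
      simp only [List.foldl_cons]
      have hget : PySem.List.pyGetD (pre ++ x :: xs) (pre.length : Int) 0 = x := by
        rw [PySem.List.pyGetD_natCast, getD_append_length]
      have hmod : ∀ (q : List Int), PySem.Int.mod (pre.length : Int) (q.length : Int)
          = ((pre.length % q.length : Nat) : Int) := fun q => PySem.Int.mod_natCast _ _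
      have harr : ∀ (q : List Int),
          PySem.List.pyGetD q (((pre.length % q.length : Nat) : Int)) 0
            = q.getD (pre.length % q.length) 0 := fun q => PySem.List.pyGetD_natCast _ _ _
      have hlen : ((pre.length : Int) + 1) = (((pre ++ [x]).length : Nat) : Int) := by
        simp
      have hlist : pre ++ x :: xs = (pre ++ [x]) ++ xs := by simp
      rw [hget, hmod a, hmod b, hmod c, harr, harr, harr, hlist, hlen,
        ih (pre ++ [x])]
      simp only [specCnt, List.length_append, List.length_cons, List.length_nil,
        Nat.zero_add, Prod.mk.injEq]
      refine ⟨?_, ?_, ?_⟩ <;> · split_ifs <;> omega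

theorem foldA_zero (a b c : List Int) (xs : List Int) :
    (PySem.List.pyRange 0 (xs.length : Int) 1).foldl
        (fun (s : Int × Int × Int) num =>
          (if PySem.List.pyGetD xs num 0 = PySem.List.pyGetD a (PySem.Int.mod num (a.length : Int)) 0 then s.1 + 1 else s.1,
           if PySem.List.pyGetD xs num 0 = PySem.List.pyGetD b (PySem.Int.mod num (b.length : Int)) 0 then s.2.1 + 1 else s.2.1,
           if PySem.List.pyGetD xs num 0 = PySem.List.pyGetD c (PySem.Int.mod num (c.length : Int)) 0 then s.2.2 + 1 else s.2.2)) (0, 0, 0)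
      = (0 + specCnt a xs 0, 0 + specCnt b xs 0, 0 + specCnt c xs 0) :=
  foldA_spec a b c xs [] 0 0 0

-- ===== VERDICT (by name: the statement is the Claim_ definition above) =====
theorem solution_spec : Claim_equal_solution := by
  intro answers _
  simp only [Spec_solution, solution, solution_alt]
  rw [foldA_zero [1,2,3,4,5] [2,1,2,3,2,4,2,5] [3,3,1,1,2,2,4,4,5,5] answers]
  simp only [zero_add]
  simp only [List.map_cons, List.map_nil]
  rw [cm_eq_spec [1,2,3,4,5] (by simp), cm_eq_spec [2,1,2,3,2,4,2,5] (by simp),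
    cm_eq_spec [3,3,1,1,2,2,4,4,5,5] (by simp)]
  generalize specCnt [1,2,3,4,5] answers 0 = s0
  generalize specCnt [2,1,2,3,2,4,2,5] answers 0 = s1
  generalize specCnt [3,3,1,1,2,2,4,4,5,5] answers 0 = s2
  rw [show PySem.List.pyRange 0 3 1 = [0,1,2] by decide]
  simp only [PySem.List.enumerate_cons, PySem.List.enumerate_nil,
    List.filter_cons, List.filter_nil,
    show PySem.List.pyGetD [s0,s1,s2] (0:Int) 0 = s0 from rfl,
    show PySem.List.pyGetD [s0,s1,s2] (1:Int) 0 = s1 from rfl,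
    show PySem.List.pyGetD [s0,s1,s2] (2:Int) 0 = s2 from rfl]
  norm_num
  split_ifs <;> rfl
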